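-- pv_equiv track=rewrite | github.com/GAURAVSVNIT/AI-LAB | LAB-7/Q1.py | get_nxt
-- ===== SOURCE A (Python) =====
-- def calc(arr):
--     h = 0
--     for i in range(8):
--         for j in range(i + 1, 8):
--             if arr[i] == arr[j]:
--                 h = h + 1
--             if abs(arr[i] - arr[j]) == abs(i - j):
--                 h = h + 1
--     return h
--
-- def get_nxt(b):
--     min_h = calc(b)
--     best = list(b)
--
--     for i in range(8):
--         for j in range(8):
--             if b[i] != j:
--                 temp = list(b)
--                 temp[i] = j
--                 th = calc(temp)
--                 if th < min_h:
--                     min_h = th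
--                     best = list(temp)
--     return best, min_h
-- ===== SOURCE B (Python) =====
-- def _pairs(vals):
--     cnt = {}
--     for v in vals:
--         cnt[v] = cnt.get(v, 0) + 1
--     return sum(c * (c - 1) // 2 for c in cnt.values())
--
-- def _conflicts(arr):
--     return (_pairs([arr[i] for i in range(8)])
--             + _pairs([arr[i] - i for i in range(8)])
--             + _pairs([arr[i] + i for i in range(8)]))
--
-- def get_nxt(b):
--     cands = [list(b)]
--     for i in range(8):
--         for j in range(8):
--             if b[i] != j:
--                 cands.append(b[:i] + [j] + b[i + 1:])
--     best = min(cands, key=_conflicts)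
--     return best, _conflicts(best)
-- ===== Notes on version B (the rewrite author's own statement) =====
-- stated objective: alternative
-- what changed: calc's O(n^2) pairwise double scan is replaced by hash-table counting (counters of rows, of the two diagonal keys arr[i]-i and arr[i]+i, summing c*(c-1)//2 over counts), and get_nxt's running-minimum loop with in-place mutation is replaced by building the candidate-board list once and taking min(cands, key=...), whose first-minimizer rule reproduces A's strict-< tie-break.
import Mathlib
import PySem

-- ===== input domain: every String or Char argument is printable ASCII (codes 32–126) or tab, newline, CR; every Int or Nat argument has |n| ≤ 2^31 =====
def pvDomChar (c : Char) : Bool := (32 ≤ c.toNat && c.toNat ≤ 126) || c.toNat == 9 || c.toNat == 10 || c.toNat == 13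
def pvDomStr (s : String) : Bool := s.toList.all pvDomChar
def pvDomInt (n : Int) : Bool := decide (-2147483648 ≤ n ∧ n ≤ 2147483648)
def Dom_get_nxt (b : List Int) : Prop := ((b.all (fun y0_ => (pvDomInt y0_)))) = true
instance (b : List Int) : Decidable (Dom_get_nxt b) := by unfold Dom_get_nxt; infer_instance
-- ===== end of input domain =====

-- B replaces calc's pairwise double scan with hash-table counting of rows and diagonal keys,
-- and replaces get_nxt's running-minimum update loop by min over the explicit candidate list.

-- ===== PORT A =====
-- helper calc of A: pairwise conflict scan (arr[i] exact under Pre_, which keeps indices 0..7 in range)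
def calcOrig (arr : List Int) : Int :=
  (PySem.List.pyRange 0 8 1).foldl (fun h i =>
    (PySem.List.pyRange (i + 1) 8 1).foldl (fun h j =>
      let h1 := if PySem.List.pyGetD arr i 0 = PySem.List.pyGetD arr j 0 then h + 1 else h
      if |PySem.List.pyGetD arr i 0 - PySem.List.pyGetD arr j 0| = |i - j| then h1 + 1 else h1) h) 0

def get_nxt (b : List Int) : List Int × Int :=
  let min_h := calcOrig b
  let best := b  -- list(b): a value copy
  (PySem.List.pyRange 0 8 1).foldl (fun acc i =>
    (PySem.List.pyRange 0 8 1).foldl (fun acc j =>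
      if PySem.List.pyGetD b i 0 ≠ j then
        let temp := PySem.List.pySetD b i j  -- temp = list(b); temp[i] = j (in range under Pre_)
        let th := calcOrig temp
        if th < acc.2 then (temp, th) else acc
      else acc) acc) (best, min_h)

-- ===== PORT B =====
-- helper _pairs of B: counter dict, then sum of c*(c-1)//2 over its values
def pairsAlt (vals : List Int) : Int :=
  let cnt : PySem.Dict Int Int :=
    vals.foldl (fun d v => d.insert v (d.getD v 0 + 1)) PySem.Dict.empty
  (cnt.values.map (fun c => PySem.Int.floordiv (c * (c - 1)) 2)).sum

-- helper _conflicts of B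
def conflictsAlt (arr : List Int) : Int :=
  pairsAlt ((PySem.List.pyRange 0 8 1).map (fun i => PySem.List.pyGetD arr i 0))
  + pairsAlt ((PySem.List.pyRange 0 8 1).map (fun i => PySem.List.pyGetD arr i 0 - i))
  + pairsAlt ((PySem.List.pyRange 0 8 1).map (fun i => PySem.List.pyGetD arr i 0 + i))

def get_nxt_alt (b : List Int) : List Int × Int :=
  let cands := (PySem.List.pyRange 0 8 1).foldl (fun acc i =>
    (PySem.List.pyRange 0 8 1).foldl (fun acc j =>
      if PySem.List.pyGetD b i 0 ≠ j then
        acc ++ [PySem.List.slice b none (some i) ++ [j] ++ PySem.List.slice b (some (i + 1)) none]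
      else acc) acc) [b]
  match PySem.List.min? cands conflictsAlt with
  | some best => (best, conflictsAlt best)
  | none => ([], 0)  -- unreachable: cands starts with b, so min? never returns none

-- ===== PRECONDITION & SPEC =====
-- Pre_ excludes only boards shorter than 8, on which Python A raises IndexError (b[i] for i < 8).
def Pre_get_nxt (b : List Int) : Prop := 8 ≤ b.length
instance (b : List Int) : Decidable (Pre_get_nxt b) := by unfold Pre_get_nxt; infer_instance
def pvWitness_get_nxt : List Int := [0, 1, 2, 3, 4, 5, 6, 7]

def Spec_get_nxt (b : List Int) (out : List Int × Int) : Prop := out = get_nxt_alt b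
instance (b : List Int) (out : List Int × Int) : Decidable (Spec_get_nxt b out) := by unfold Spec_get_nxt; infer_instance

-- ===== CLAIM (what is proved, stated in full; the proofs are below) =====
def Claim_equal_get_nxt : Prop := ∀ (b : List Int), Dom_get_nxt b → Pre_get_nxt b → Spec_get_nxt b (get_nxt b)

-- ===== LEMMAS AND PROOFS =====

-- indicator of a decidable proposition
def pvInd (p : Prop) [Decidable p] : Int := if p then 1 else 0

-- c*(c-1)//2
def pvC2 (c : Int) : Int := PySem.Int.floordiv (c * (c - 1)) 2

-- head-recursive count of equal pairs (i < j with l[i] = l[j])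
def pvPC : List Int → Int
  | [] => 0
  | x :: xs => (xs.count x : Int) + pvPC xs

lemma pvC2_succ (n : Nat) : pvC2 ((n : Int) + 1) = pvC2 (n : Int) + n := by
  unfold pvC2
  rw [PySem.Int.floordiv_eq_ediv_of_pos (by norm_num), PySem.Int.floordiv_eq_ediv_of_pos (by norm_num)]
  have h : ((n : Int) + 1) * ((n : Int) + 1 - 1) = (n : Int) * ((n : Int) - 1) + (n : Int) * 2 := by ring
  rw [h, Int.add_mul_ediv_right _ _ (by norm_num)]

lemma pvPC_append_singleton (l : List Int) (x : Int) :
    pvPC (l ++ [x]) = pvPC l + l.count x := by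
  induction l with
  | nil => simp [pvPC]
  | cons y t ih =>
    simp only [List.cons_append, pvPC, ih, List.count_append, List.count_cons, List.count_nil]
    have hbe : (x == y) = (y == x) := by simp [eq_comm]
    rw [hbe]
    push_cast
    split <;> omega

lemma pvSumUpdate (s : List Int) (x : Int) (f g : Int → Int)
    (hs : s.Nodup) (hx : x ∈ s) (h : ∀ k ∈ s, k ≠ x → f k = g k) :
    (s.map f).sum = (s.map g).sum + (f x - g x) := by
  induction s with
  | nil => cases hx
  | cons y t ih =>
    rcases List.mem_cons.mp hx with heq | hxt
    · subst heq
      have hyt : x ∉ t := (List.nodup_cons.mp hs).1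
      have hmt : t.map f = t.map g :=
        List.map_congr_left (fun k hk => h k (List.mem_cons_of_mem _ hk) (fun he => hyt (he ▸ hk)))
      simp [hmt]; ring
    · have hy : f y = g y := by
        refine h y List.mem_cons_self (fun he => ?_)
        exact (List.nodup_cons.mp hs).1 (he ▸ hxt)
      have ihh := ih (List.nodup_cons.mp hs).2 hxt (fun k hk => h k (List.mem_cons_of_mem _ hk))
      simp [ihh, hy]; ring

lemma pvSumC2 (l : List Int) :
    ((PySem.Set.ofList l).map (fun k => pvC2 ((l.count k : Int)))).sum = pvPC l := by
  induction l using List.reverseRecOn with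
  | nil => simp [pvPC, PySem.Set.ofList]
  | append_singleton t x ih =>
    rw [pvPC_append_singleton, PySem.Set.ofList_append_singleton]
    by_cases hx : x ∈ t
    · have hmem : x ∈ PySem.Set.ofList t := by rw [PySem.Set.mem_ofList]; exact hx
      rw [PySem.Set.add_of_mem hmem]
      rw [pvSumUpdate (PySem.Set.ofList t) x
            (fun k => pvC2 (((t ++ [x]).count k : Int)))
            (fun k => pvC2 ((t.count k : Int)))
            (PySem.Set.nodup_ofList t) hmem ?_]
      · have hc : ((t ++ [x]).count x : Int) = (t.count x : Int) + 1 := by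
          simp [List.count_append]
        rw [ih, hc, pvC2_succ]
        ring
      · intro k hk hkx
        have hck : (t ++ [x]).count k = t.count k := by
          simp [List.count_append, hkx.symm]
        simp [hck]
    · have hmem : x ∉ PySem.Set.ofList t := by rw [PySem.Set.mem_ofList]; exact hx
      rw [PySem.Set.add_of_not_mem hmem]
      have hc0 : t.count x = 0 := List.count_eq_zero.mpr hx
      have hmap : (PySem.Set.ofList t).map (fun k => pvC2 (((t ++ [x]).count k : Int))) =
          (PySem.Set.ofList t).map (fun k => pvC2 ((t.count k : Int))) := by
        apply List.map_congr_left
        intro k hk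
        have hkx : k ≠ x := fun he => hx (he ▸ ((PySem.Set.mem_ofList t k).mp hk))
        simp [List.count_append, hkx.symm]
      rw [List.map_append, List.sum_append, hmap, ih]
      have hx1 : List.count x (t ++ [x]) = 1 := by simp [List.count_append, hc0]
      simp only [List.map_cons, List.map_nil, hx1, hc0]
      have h2 : pvC2 (1 : Int) = 0 := by decide
      simp [h2]

lemma pairsAlt_eq_pvPC (l : List Int) : pairsAlt l = pvPC l := by
  unfold pairsAlt
  rw [PySem.Dict.foldl_insert_getD_add_one_eq_counter]
  show ((PySem.Dict.counter l).values.map (fun c => pvC2 c)).sum = pvPC l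
  rw [PySem.Dict.values, PySem.Dict.items_counter, List.map_map, List.map_map]
  have := pvSumC2 l
  simpa [Function.comp_def] using this

-- pvPC of a mapped range is the double range sum of equality indicators
lemma pvPC_map_range (g : Int → Int) (a b : Int) :
    pvPC ((PySem.List.pyRange a b 1).map g) =
    ((PySem.List.pyRange a b 1).map
      (fun i => ((PySem.List.pyRange (i + 1) b 1).map (fun j => pvInd (g i = g j))).sum)).sum := by
  have aux : ∀ (n : Nat) (a : Int), (b - a).toNat = n →
      pvPC ((PySem.List.pyRange a b 1).map g) =
      ((PySem.List.pyRange a b 1).map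
        (fun i => ((PySem.List.pyRange (i + 1) b 1).map (fun j => pvInd (g i = g j))).sum)).sum := by
    intro n
    induction n with
    | zero =>
      intro a ha
      rw [PySem.List.pyRange_one_eq_nil (by omega)]
      rfl
    | succ n ih =>
      intro a ha
      have hab : a < b := by omega
      rw [PySem.List.pyRange_one_cons hab]
      simp only [List.map_cons, List.sum_cons, pvPC]
      rw [ih (a + 1) (by omega)]
      have hsum : ((PySem.List.pyRange (a + 1) b 1).map (fun j => pvInd (g a = g j))).sum
          = (List.countP (fun j => decide (g a = g j)) (PySem.List.pyRange (a + 1) b 1) : Int) := by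
        simpa [pvInd] using
          PySem.List.sum_map_ite_one_zero (fun j => decide (g a = g j)) (PySem.List.pyRange (a + 1) b 1)
      have hcnt : ((PySem.List.pyRange (a + 1) b 1).map g).count (g a)
          = List.countP (fun j => decide (g a = g j)) (PySem.List.pyRange (a + 1) b 1) := by
        rw [List.count, List.countP_map]
        apply List.countP_congr
        intro j _
        simp only [Function.comp_apply]
        by_cases h : g a = g j
        · simp [h]
        · simp [h, Ne.symm h]
      rw [hsum, ← hcnt]
  exact aux (b - a).toNat a rfl

-- diagonal split: for i < j the diagonal hit is exactly one of the two diagonal-key equalities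
lemma pvDiag (x y i j : Int) (hij : i < j) :
    pvInd (|x - y| = |i - j|) = pvInd (x - i = y - j) + pvInd (x + i = y + j) := by
  unfold pvInd
  rcases abs_cases (x - y) with ⟨h1, h2⟩ | ⟨h1, h2⟩ <;>
    rcases abs_cases (i - j) with ⟨h3, h4⟩ | ⟨h3, h4⟩ <;>
    split_ifs <;> omega

lemma calc_eq (arr : List Int) : calcOrig arr = conflictsAlt arr := by
  unfold calcOrig conflictsAlt
  rw [pairsAlt_eq_pvPC, pairsAlt_eq_pvPC, pairsAlt_eq_pvPC,
      pvPC_map_range, pvPC_map_range, pvPC_map_range]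
  have step1 : ∀ (i : Int) (h : Int),
      (PySem.List.pyRange (i + 1) 8 1).foldl (fun h j =>
        let h1 := if PySem.List.pyGetD arr i 0 = PySem.List.pyGetD arr j 0 then h + 1 else h
        if |PySem.List.pyGetD arr i 0 - PySem.List.pyGetD arr j 0| = |i - j| then h1 + 1 else h1) h
      = h + ((PySem.List.pyRange (i + 1) 8 1).map (fun j =>
          pvInd (PySem.List.pyGetD arr i 0 = PySem.List.pyGetD arr j 0) +
          pvInd (|PySem.List.pyGetD arr i 0 - PySem.List.pyGetD arr j 0| = |i - j|))).sum := by
    intro i h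
    rw [PySem.List.foldl_congr_mem _ _
        (fun acc j => acc +
          (pvInd (PySem.List.pyGetD arr i 0 = PySem.List.pyGetD arr j 0) +
           pvInd (|PySem.List.pyGetD arr i 0 - PySem.List.pyGetD arr j 0| = |i - j|))) h
        (by intro acc j _; unfold pvInd; dsimp only; split_ifs <;> ring)]
    exact PySem.List.foldl_add _ _ h
  rw [PySem.List.foldl_congr_mem _ _
      (fun acc i => acc + ((PySem.List.pyRange (i + 1) 8 1).map (fun j =>
          pvInd (PySem.List.pyGetD arr i 0 = PySem.List.pyGetD arr j 0) +
          pvInd (|PySem.List.pyGetD arr i 0 - PySem.List.pyGetD arr j 0| = |i - j|))).sum) 0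
      (by intro acc i _; exact step1 i acc)]
  rw [PySem.List.foldl_add]
  have hinner : ∀ i ∈ PySem.List.pyRange 0 8 1,
      ((PySem.List.pyRange (i + 1) 8 1).map (fun j =>
          pvInd (PySem.List.pyGetD arr i 0 = PySem.List.pyGetD arr j 0) +
          pvInd (|PySem.List.pyGetD arr i 0 - PySem.List.pyGetD arr j 0| = |i - j|))).sum
      = ((PySem.List.pyRange (i + 1) 8 1).map (fun j =>
          pvInd (PySem.List.pyGetD arr i 0 = PySem.List.pyGetD arr j 0))).sum
        + (((PySem.List.pyRange (i + 1) 8 1).map (fun j =>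
            pvInd (PySem.List.pyGetD arr i 0 - i = PySem.List.pyGetD arr j 0 - j))).sum
          + ((PySem.List.pyRange (i + 1) 8 1).map (fun j =>
            pvInd (PySem.List.pyGetD arr i 0 + i = PySem.List.pyGetD arr j 0 + j))).sum) := by
    intro i _
    have hmc : (PySem.List.pyRange (i + 1) 8 1).map (fun j =>
          pvInd (PySem.List.pyGetD arr i 0 = PySem.List.pyGetD arr j 0) +
          pvInd (|PySem.List.pyGetD arr i 0 - PySem.List.pyGetD arr j 0| = |i - j|))
        = (PySem.List.pyRange (i + 1) 8 1).map (fun j =>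
          pvInd (PySem.List.pyGetD arr i 0 = PySem.List.pyGetD arr j 0) +
          (pvInd (PySem.List.pyGetD arr i 0 - i = PySem.List.pyGetD arr j 0 - j) +
           pvInd (PySem.List.pyGetD arr i 0 + i = PySem.List.pyGetD arr j 0 + j))) := by
      apply List.map_congr_left
      intro j hj
      have hij : i < j := by
        have := PySem.List.mem_pyRange_one.mp hj
        omega
      rw [pvDiag _ _ _ _ hij]
    rw [hmc, PySem.List.sum_map_add_int, PySem.List.sum_map_add_int]
  rw [List.map_congr_left hinner, PySem.List.sum_map_add_int, PySem.List.sum_map_add_int]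
  ring

-- min? on a nonempty list is the running-minimum fold
lemma pvMin?_cons {α : Type} (key : α → Int) (x : α) (L : List α) :
    PySem.List.min? (x :: L) key = some (L.foldl (fun m y => if key y < key m then y else m) x) := by
  have aux : ∀ (M : List α) (m : α),
      M.foldl (fun acc y => match acc with
        | none => some y
        | some m => if key y < key m then some y else some m) (some m) =
      some (M.foldl (fun m y => if key y < key m then y else m) m) := by
    intro M
    induction M with
    | nil => intro m; rfl
    | cons t ts ih =>
      intro m
      simp only [List.foldl_cons]
      by_cases h : key t < key m
      · rw [if_pos h, if_pos h, ih]
      · rw [if_neg h, if_neg h, ih]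
  simp only [PySem.List.min?, List.foldl_cons]
  exact aux L x

-- the (best, min_h) fold carries key of the running minimum
lemma pvPairFold (key : List Int → Int) (L : List (List Int)) (x : List Int) :
    L.foldl (fun acc t => if key t < acc.2 then (t, key t) else acc) (x, key x) =
    (L.foldl (fun m t => if key t < key m then t else m) x,
     key (L.foldl (fun m t => if key t < key m then t else m) x)) := by
  induction L generalizing x with
  | nil => rfl
  | cons t ts ih =>
    simp only [List.foldl_cons]
    by_cases h : key t < key x <;> simp [h, ih]

lemma pvSetSlice (b : List Int) (hb : 8 ≤ b.length) (i : Int) (h0 : 0 ≤ i) (h8 : i < 8) (j : Int) :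
    PySem.List.pySetD b i j =
    PySem.List.slice b none (some i) ++ [j] ++ PySem.List.slice b (some (i + 1)) none := by
  rw [PySem.List.pySetD_of_nonneg b j h0, PySem.List.slice_to b h0,
      PySem.List.slice_from b (by omega : (0 : Int) ≤ i + 1)]
  have h1 : (i + 1).toNat = i.toNat + 1 := by omega
  have h2 : i.toNat < b.length := by omega
  rw [h1, List.set_eq_take_append_cons_drop, if_pos h2]
  simp

lemma main_eq (b : List Int) (hb : 8 ≤ b.length) : get_nxt b = get_nxt_alt b := by
  have hcands :
      (PySem.List.pyRange 0 8 1).foldl (fun acc i =>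
        (PySem.List.pyRange 0 8 1).foldl (fun acc j =>
          if PySem.List.pyGetD b i 0 ≠ j then
            acc ++ [PySem.List.slice b none (some i) ++ [j] ++ PySem.List.slice b (some (i + 1)) none]
          else acc) acc) [b]
      = b :: (PySem.List.pyRange 0 8 1).flatMap (fun i =>
          ((PySem.List.pyRange 0 8 1).filter (fun j => decide (PySem.List.pyGetD b i 0 ≠ j))).map
            (fun j => PySem.List.pySetD b i j)) := by
    rw [PySem.List.foldl_congr_mem _ _
        (fun acc i => acc ++
          ((PySem.List.pyRange 0 8 1).filter (fun j => decide (PySem.List.pyGetD b i 0 ≠ j))).map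
            (fun j => PySem.List.pySetD b i j)) [b] ?_]
    · rw [PySem.List.foldl_append_eq_flatMap]
      rfl
    · intro acc i hi
      obtain ⟨hi0, hi8⟩ := PySem.List.mem_pyRange_one.mp hi
      rw [PySem.List.foldl_append_ite (fun j => PySem.List.pyGetD b i 0 ≠ j) _ _ acc]
      congr 1
      apply List.map_congr_left
      intro j _
      exact (pvSetSlice b hb i hi0 hi8 j).symm
  have hA : get_nxt b =
      ((PySem.List.pyRange 0 8 1).flatMap (fun i =>
        ((PySem.List.pyRange 0 8 1).filter (fun j => decide (PySem.List.pyGetD b i 0 ≠ j))).map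
          (fun j => PySem.List.pySetD b i j))).foldl
        (fun acc t => if conflictsAlt t < acc.2 then (t, conflictsAlt t) else acc)
        (b, conflictsAlt b) := by
    show (PySem.List.pyRange 0 8 1).foldl (fun acc i =>
        (PySem.List.pyRange 0 8 1).foldl (fun acc j =>
          if PySem.List.pyGetD b i 0 ≠ j then
            (if calcOrig (PySem.List.pySetD b i j) < acc.2 then
              (PySem.List.pySetD b i j, calcOrig (PySem.List.pySetD b i j)) else acc)
          else acc) acc) (b, calcOrig b) = _
    simp only [calc_eq]
    rw [List.foldl_flatMap]
    simp only [List.foldl_map]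
    apply PySem.List.foldl_congr_mem
    intro acc i _
    exact PySem.List.foldl_ite_eq_foldl_filter (fun j => PySem.List.pyGetD b i 0 ≠ j) _ _ acc
  rw [hA, pvPairFold]
  simp only [get_nxt_alt]
  rw [hcands, pvMin?_cons]

-- ===== VERDICT (by name: the statement is the Claim_ definition above) =====
theorem get_nxt_spec : Claim_equal_get_nxt := by
  intro b _ hpre
  unfold Spec_get_nxt
  exact main_eq b hpre
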